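-- pv_equiv track=rewrite | github.com/Mantra0804/PC503_DAIICT | main_test.py | get_unique_dict
-- ===== SOURCE A (Python) =====
-- def get_unique_dict(to_be_written):
--     reverse_dict = dict()
--     to_be_returned = dict()
--     for k, v in to_be_written.items():
--         for name in v:
--             if reverse_dict.get(name):
--                 reverse_dict[name].append(k)
--             else:
--                 reverse_dict[name] = [k]
--
--     for k, v in reverse_dict.items():
--         reverse_dict[k]= sorted(v)[-1]
--
--     for k,v in reverse_dict.items():
--         if to_be_returned.get(v):
--             to_be_returned[v].append(k)
--         else:
--             to_be_returned[v] = [k]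
--
--     return to_be_returned
-- ===== SOURCE B (Python) =====
-- def get_unique_dict(to_be_written):
--     # One pass keeping a running maximum key per name, then one grouping pass.
--     name_to_max = {}
--     for k, v in to_be_written.items():
--         for name in v:
--             if name in name_to_max:
--                 if k > name_to_max[name]:
--                     name_to_max[name] = k
--             else:
--                 name_to_max[name] = k
--     grouped = {}
--     for name, mk in name_to_max.items():
--         grouped.setdefault(mk, []).append(name)
--     return grouped
-- ===== Notes on version B (the rewrite author's own statement) =====
-- stated objective: simpler
-- what changed: Replaces A's three passes (accumulate a list of keys per name, then sort each list and take its last element, then regroup) with a single build pass that keeps a running maximum key per name, followed by one grouping pass using setdefault; no per-name key lists and no sorting.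
import Mathlib
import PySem

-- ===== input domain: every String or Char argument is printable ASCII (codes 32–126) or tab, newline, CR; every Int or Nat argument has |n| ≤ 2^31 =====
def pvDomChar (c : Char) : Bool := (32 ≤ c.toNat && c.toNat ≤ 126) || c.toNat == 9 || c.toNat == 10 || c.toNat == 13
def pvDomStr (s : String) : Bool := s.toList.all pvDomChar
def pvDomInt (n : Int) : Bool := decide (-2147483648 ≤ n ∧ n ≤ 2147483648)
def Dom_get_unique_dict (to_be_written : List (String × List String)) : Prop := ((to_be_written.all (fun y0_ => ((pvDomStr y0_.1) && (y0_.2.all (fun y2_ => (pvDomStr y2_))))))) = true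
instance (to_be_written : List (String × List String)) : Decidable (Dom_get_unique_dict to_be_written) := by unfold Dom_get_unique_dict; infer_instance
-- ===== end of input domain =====

-- B replaces A's list-of-keys-per-name + per-list sort + regroup by a running maximum per name
-- plus one grouping pass (objective: simpler).

-- ===== PORT A =====
-- sorted(v)[-1]; in A the list v is always non-empty, so the "" default is unreachable
-- (on [] Python would raise IndexError).
def sortedLastD (v : List String) : String :=
  (PySem.List.pyGet? (PySem.List.sorted v (fun x => x) false) (-1)).getD ""

def get_unique_dict (to_be_written : List (String × List String)) : List (String × List String) :=
  let reverse_dict : PySem.Dict String (List String) :=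
    to_be_written.foldl (fun rd kv =>
      kv.2.foldl (fun rd name =>
        if rd.getD name [] ≠ [] then rd.modify name [] (fun l => l ++ [kv.1])
        else rd.insert name [kv.1]) rd) PySem.Dict.empty
  let reverse2 : PySem.Dict String String :=
    reverse_dict.items.foldl (fun d p => d.insert p.1 (sortedLastD p.2)) PySem.Dict.empty
  let to_be_returned : PySem.Dict String (List String) :=
    reverse2.items.foldl (fun d p =>
      if d.getD p.2 [] ≠ [] then d.modify p.2 [] (fun l => l ++ [p.1])
      else d.insert p.2 [p.1]) PySem.Dict.empty
  to_be_returned.items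

-- ===== PORT B =====
def get_unique_dict_alt (to_be_written : List (String × List String)) : List (String × List String) :=
  let name_to_max : PySem.Dict String String :=
    to_be_written.foldl (fun d kv =>
      kv.2.foldl (fun d name =>
        if d.contains name then
          (if d.getD name "" < kv.1 then d.insert name kv.1 else d)
        else d.insert name kv.1) d) PySem.Dict.empty
  let grouped : PySem.Dict String (List String) :=
    name_to_max.items.foldl (fun d p =>
      (d.setdefault p.2 []).modify p.2 (fun l => l ++ [p.1]) (dflt := [])) PySem.Dict.empty
  grouped.items

-- ===== PRECONDITION & SPEC =====
def Spec_get_unique_dict (to_be_written : List (String × List String)) (out : List (String × List String)) : Prop := out = get_unique_dict_alt to_be_written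
instance (to_be_written : List (String × List String)) (out : List (String × List String)) : Decidable (Spec_get_unique_dict to_be_written out) := by unfold Spec_get_unique_dict; infer_instance

-- ===== CLAIM (what is proved, stated in full; the proofs are below) =====
def Claim_equal_get_unique_dict : Prop := ∀ (to_be_written : List (String × List String)), Dom_get_unique_dict to_be_written → Spec_get_unique_dict to_be_written (get_unique_dict to_be_written)

-- ===== LEMMAS AND PROOFS =====

-- proof-side names for the two phase-1 step functions and the value map relating the dicts
def pvStrip (p : String × List String) : String × String := (p.1, sortedLastD p.2)

def stepA1 (rd : PySem.Dict String (List String)) (p : String × String) :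
    PySem.Dict String (List String) :=
  if rd.getD p.2 [] ≠ [] then rd.modify p.2 [] (fun l => l ++ [p.1])
  else rd.insert p.2 [p.1]

def stepB1 (d : PySem.Dict String String) (p : String × String) : PySem.Dict String String :=
  if d.contains p.2 then
    (if d.getD p.2 "" < p.1 then d.insert p.2 p.1 else d)
  else d.insert p.2 p.1

lemma max_eq_ite (a b : String) : max a b = if a < b then b else a := by
  rcases lt_or_ge a b with h | h
  · simp [h, max_eq_right h.le]
  · simp [not_lt.mpr h, max_eq_left h]

lemma pyGet?_neg_one_concat (l : List String) (a : String) :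
    PySem.List.pyGet? (l ++ [a]) (-1) = some a := by
  simp [PySem.List.pyGet?, PySem.List.pyIdx?]

-- sorted(v)[-1] is the running maximum of v
lemma sortedLastD_cons (x : String) (t : List String) :
    sortedLastD (x :: t) = t.foldl max x := by
  have hperm := PySem.List.sorted_perm (x :: t) (fun x => x) false
  have hpw := PySem.List.sorted_pairwise (x :: t) (fun x => x)
  have hne : PySem.List.sorted (x :: t) (fun x => x) false ≠ [] := by
    intro h; rw [h] at hperm; exact (List.cons_ne_nil x t) hperm.symm.eq_nil
  obtain ⟨l, a, hsa⟩ := (List.eq_nil_or_concat _).resolve_left hne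
  rw [List.concat_eq_append] at hsa
  rw [hsa] at hperm hpw
  have hmax := PySem.List.le_foldl_max t x
  have hmem_m : t.foldl max x ∈ l ++ [a] := by
    apply hperm.symm.subset
    rcases PySem.List.foldl_max_mem t x with h | h
    · rw [h]; exact List.mem_cons_self
    · exact List.mem_cons_of_mem _ h
  have ha_mem : a ∈ x :: t := hperm.subset (by simp)
  have ha_le : a ≤ t.foldl max x := by
    rcases List.mem_cons.mp ha_mem with h | h
    · rw [h]; exact hmax.1
    · exact hmax.2 _ h
  have hle : t.foldl max x ≤ a := by
    rcases List.mem_append.mp hmem_m with h | h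
    · exact (List.pairwise_append.mp hpw).2.2 _ h a (by simp)
    · simp at h; exact le_of_eq h
  rw [sortedLastD, hsa, pyGet?_neg_one_concat]
  simpa using (le_antisymm ha_le hle)

lemma sortedLastD_singleton (k : String) : sortedLastD [k] = k := by
  simpa using sortedLastD_cons k []

lemma sortedLastD_concat (v : List String) (hv : v ≠ []) (k : String) :
    sortedLastD (v ++ [k]) = if sortedLastD v < k then k else sortedLastD v := by
  obtain ⟨x, t, rfl⟩ := List.exists_cons_of_ne_nil hv
  rw [List.cons_append, sortedLastD_cons, sortedLastD_cons, List.foldl_append,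
    List.foldl_cons, List.foldl_nil, max_eq_ite]

-- a nested (key, list-of-names) loop is the flat loop over all (key, name) pairs
lemma foldl_nested {δ : Type} (l : List (String × List String))
    (g : δ → String → String → δ) (d : δ) :
    l.foldl (fun d kv => kv.2.foldl (fun d name => g d kv.1 name) d) d
      = (l.flatMap (fun kv => kv.2.map (fun name => (kv.1, name)))).foldl
          (fun d p => g d p.1 p.2) d := by
  induction l generalizing d with
  | nil => rfl
  | cons kv rest ih => simp [List.foldl_append, List.foldl_map, ih]

-- under Nodup keys an entry with a given key is unique
lemma eq_of_mem_items_nodup {ν : Type} (d : PySem.Dict String ν) (hnd : d.keys.Nodup)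
    {k : String} {v : ν} (hv : (k, v) ∈ d.items) (q : String × ν) (hq : q ∈ d.items)
    (hk : q.1 = k) : q = (k, v) := by
  have h1 := PySem.Dict.get?_of_mem_items d hv hnd
  have h2 := PySem.Dict.get?_of_mem_items d (k := q.1) (v := q.2) (by simpa using hq) hnd
  rw [hk, h1] at h2
  have hv2 : q.2 = v := (Option.some.inj h2).symm
  obtain ⟨a, b⟩ := q
  simp only at hk hv2
  rw [hk, hv2]

lemma keys_eq_of_strip (dA : PySem.Dict String (List String)) (dB : PySem.Dict String String)
    (h3 : dB.items = dA.items.map pvStrip) : dB.keys = dA.keys := by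
  simp only [PySem.Dict.keys, h3, List.map_map]
  rfl

-- one step of phase 1 preserves the invariant: A's dict has Nodup keys and non-empty value
-- lists, and B's dict is A's with each value list collapsed to sorted(v)[-1]
lemma step1_inv (dA : PySem.Dict String (List String)) (dB : PySem.Dict String String)
    (p : String × String)
    (h1 : dA.keys.Nodup) (h2 : ∀ q ∈ dA.items, q.2 ≠ [])
    (h3 : dB.items = dA.items.map pvStrip) :
    (stepA1 dA p).keys.Nodup ∧ (∀ q ∈ (stepA1 dA p).items, q.2 ≠ []) ∧
      (stepB1 dB p).items = (stepA1 dA p).items.map pvStrip := by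
  have hkeys := keys_eq_of_strip dA dB h3
  by_cases hc : dA.contains p.2 = true
  · -- name already present, with non-empty value list v
    have hsome : (dA.get? p.2).isSome := by
      rw [PySem.Dict.contains_eq_isSome_get?] at hc; exact hc
    obtain ⟨v, hget⟩ := Option.isSome_iff_exists.mp hsome
    have hvmem : (p.2, v) ∈ dA.items := PySem.Dict.mem_items_of_get?_eq_some dA hget
    have hvne : v ≠ [] := h2 _ hvmem
    have hgetD : dA.getD p.2 [] = v := PySem.Dict.getD_of_get?_eq_some dA [] hget
    have hA : stepA1 dA p = dA.insert p.2 (v ++ [p.1]) := by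
      rw [stepA1, if_pos (by simp [hgetD, hvne]), PySem.Dict.modify, hgetD]
    have hAitems : (stepA1 dA p).items
        = dA.items.map (fun q => if q.1 == p.2 then (p.2, v ++ [p.1]) else q) := by
      rw [hA, PySem.Dict.items_insert_of_contains _ _ hc]
    have hcB : dB.contains p.2 = true := by
      rw [PySem.Dict.contains_iff_mem_keys, hkeys, ← PySem.Dict.contains_iff_mem_keys]; exact hc
    have hBnd : dB.keys.Nodup := by rw [hkeys]; exact h1
    have hBmem : (p.2, sortedLastD v) ∈ dB.items := by
      rw [h3]; exact List.mem_map_of_mem hvmem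
    have hBgetD : dB.getD p.2 "" = sortedLastD v :=
      PySem.Dict.getD_of_mem_items dB hBmem hBnd ""
    refine ⟨by rw [hA, PySem.Dict.keys_insert_of_contains _ _ hc]; exact h1, ?_, ?_⟩
    · intro q hq
      rw [hAitems] at hq
      obtain ⟨r, hr, rfl⟩ := List.mem_map.mp hq
      by_cases hrk : r.1 == p.2
      · simp [hrk]
      · rw [if_neg hrk]; exact h2 r hr
    · rw [hAitems, List.map_map, stepB1, if_pos hcB, hBgetD]
      by_cases hlt : sortedLastD v < p.1
      · rw [if_pos hlt, PySem.Dict.items_insert_of_contains _ _ hcB, h3, List.map_map]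
        apply List.map_congr_left
        intro q hq
        by_cases hqk : q.1 = p.2
        · simp [Function.comp, pvStrip, hqk, sortedLastD_concat v hvne p.1, hlt]
        · simp [Function.comp, pvStrip, hqk]
      · rw [if_neg hlt, h3]
        apply List.map_congr_left
        intro q hq
        by_cases hqk : q.1 = p.2
        · have : q = (p.2, v) := eq_of_mem_items_nodup dA h1 hvmem q hq hqk
          subst this
          simp [Function.comp, pvStrip, sortedLastD_concat v hvne p.1, hlt]
        · simp [Function.comp, pvStrip, hqk]
  · -- fresh name: both dicts append a new entry
    have hc' : dA.contains p.2 = false := by simpa using hc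
    have hgetD : dA.getD p.2 [] = [] := PySem.Dict.getD_of_not_contains dA [] hc'
    have hA : stepA1 dA p = dA.insert p.2 [p.1] := by
      rw [stepA1, if_neg (by simp [hgetD])]
    have hcB : dB.contains p.2 = false := by
      rw [← Bool.not_eq_true, PySem.Dict.contains_iff_mem_keys, hkeys,
        ← PySem.Dict.contains_iff_mem_keys, Bool.not_eq_true]; exact hc'
    have hnm : p.2 ∉ dA.keys := by
      rw [← PySem.Dict.contains_iff_mem_keys, hc']; exact Bool.false_ne_true
    refine ⟨?_, ?_, ?_⟩
    · rw [hA, PySem.Dict.keys_insert_of_not_contains _ _ hc', List.nodup_append]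
      exact ⟨h1, by simp,
        by intro a ha b hb heq; rw [List.mem_singleton] at hb; exact hnm ((heq.trans hb) ▸ ha)⟩
    · intro q hq
      rw [hA, PySem.Dict.items_insert_of_not_contains _ _ hc'] at hq
      rcases List.mem_append.mp hq with h | h
      · exact h2 q h
      · rw [List.mem_singleton] at h; subst h; simp
    · rw [hA, stepB1, if_neg (by simp [hcB]), PySem.Dict.items_insert_of_not_contains _ _ hcB,
        PySem.Dict.items_insert_of_not_contains _ _ hc', h3, List.map_append]
      simp [pvStrip, sortedLastD_singleton]

-- the phase-1 fold preserves the invariant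
lemma fold1_inv (pairs : List (String × String))
    (dA : PySem.Dict String (List String)) (dB : PySem.Dict String String)
    (h1 : dA.keys.Nodup) (h2 : ∀ q ∈ dA.items, q.2 ≠ [])
    (h3 : dB.items = dA.items.map pvStrip) :
    (pairs.foldl stepA1 dA).keys.Nodup ∧
      (∀ q ∈ (pairs.foldl stepA1 dA).items, q.2 ≠ []) ∧
      (pairs.foldl stepB1 dB).items = (pairs.foldl stepA1 dA).items.map pvStrip := by
  induction pairs generalizing dA dB with
  | nil => exact ⟨h1, h2, h3⟩
  | cons p rest ih =>
    obtain ⟨g1, g2, g3⟩ := step1_inv dA dB p h1 h2 h3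
    exact ih _ _ g1 g2 g3

-- A's grouping step and B's setdefault-then-append grouping step are the same function
lemma step3_eq (d : PySem.Dict String (List String)) (p : String × String) :
    (if d.getD p.2 [] ≠ [] then d.modify p.2 [] (fun l => l ++ [p.1])
     else d.insert p.2 [p.1])
      = (d.setdefault p.2 []).modify p.2 (fun l => l ++ [p.1]) (dflt := []) := by
  by_cases hc : d.contains p.2
  · rw [PySem.Dict.setdefault_of_contains _ _ hc]
    by_cases hv : d.getD p.2 [] = []
    · rw [if_neg (by simp [hv]), PySem.Dict.modify, hv]; rfl
    · rw [if_pos hv]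
  · have hd : d.getD p.2 [] = [] := PySem.Dict.getD_of_not_contains d [] (by simpa using hc)
    rw [if_neg (by simp [hd]), PySem.Dict.setdefault_of_not_contains _ _ (by simpa using hc),
      PySem.Dict.modify, PySem.Dict.getD_insert_self, PySem.Dict.insert_insert_self]
    rfl

-- ===== VERDICT (by name: the statement is the Claim_ definition above) =====
theorem get_unique_dict_spec : Claim_equal_get_unique_dict := by
  intro tw _dom
  unfold Spec_get_unique_dict get_unique_dict get_unique_dict_alt
  rw [foldl_nested tw
      (fun rd k name =>
        if rd.getD name [] ≠ [] then rd.modify name [] (fun l => l ++ [k])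
        else rd.insert name [k]) PySem.Dict.empty,
    foldl_nested tw
      (fun d k name =>
        if d.contains name then
          (if d.getD name "" < k then d.insert name k else d)
        else d.insert name k) PySem.Dict.empty]
  set pairs := tw.flatMap (fun kv => kv.2.map (fun name => (kv.1, name))) with hp
  have hstepA : (fun (d : PySem.Dict String (List String)) (p : String × String) =>
      if d.getD p.2 [] ≠ [] then d.modify p.2 [] (fun l => l ++ [p.1])
      else d.insert p.2 [p.1]) = stepA1 := rfl
  have hstepB : (fun (d : PySem.Dict String String) (p : String × String) =>
      if d.contains p.2 then
        (if d.getD p.2 "" < p.1 then d.insert p.2 p.1 else d)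
      else d.insert p.2 p.1) = stepB1 := rfl
  rw [hstepA, hstepB]
  obtain ⟨hnd, hne, hrel⟩ := fold1_inv pairs PySem.Dict.empty PySem.Dict.empty
    (by simp [PySem.Dict.keys]; exact List.Pairwise.nil)
    (by intro q hq; simp [PySem.Dict.empty] at hq) rfl
  set dA0 := pairs.foldl stepA1 PySem.Dict.empty
  set dB0 := pairs.foldl stepB1 PySem.Dict.empty
  have hfresh : (dA0.items.foldl (fun d p => d.insert p.1 (sortedLastD p.2))
      PySem.Dict.empty).items
        = PySem.Dict.empty.items ++ dA0.items.map (fun p => (p.1, sortedLastD p.2)) :=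
    PySem.Dict.items_foldl_insert_fresh dA0.items Prod.fst (fun p => sortedLastD p.2)
      PySem.Dict.empty (fun a _ => by simp [PySem.Dict.contains, PySem.Dict.empty])
      (by exact hnd)
  have h2 : (dA0.items.foldl (fun d p => d.insert p.1 (sortedLastD p.2))
      PySem.Dict.empty).items = dB0.items := by
    rw [hfresh, hrel]; rfl
  dsimp only
  rw [h2]
  have hsteps : stepA1
      = (fun (d : PySem.Dict String (List String)) (p : String × String) =>
          (d.setdefault p.2 []).modify p.2 (fun l => l ++ [p.1]) (dflt := [])) :=
    funext fun d => funext fun p => step3_eq d p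
  rw [hsteps]
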